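-- pv_equiv track=rewrite | github.com/DE-shin/Algorithm | 프로그래머스/3/214288. 상담원 인원/상담원 인원.py | solution
-- ===== SOURCE A (Python) =====
-- from itertools import combinations
--
-- def solution(k, n, reqs):
--     answer = int(1e9)
--
--     mentors = [[] for _ in range(k+1)]
--     for comb in combinations(range(1, n), k-1):
--         if k > 1:
--             e = 0
--             for idx,s in enumerate(comb):
--                 mentors[idx+1] = [0] * (s-e)
--                 e = s
--             mentors[-1] = [0] * (n-s)
--
--         elif k:
--             mentors[1] = [0] * (n)
--         # main
--         result = 0
--         for t_start, t_lapse, typ in reqs: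
--             v = min(mentors[typ])
--             idx = mentors[typ].index(v)
--
--             if v <= t_start:
--                 mentors[typ][idx] = t_start + t_lapse
--
--             else:
--                 result += (mentors[typ][idx] - t_start)
--                 mentors[typ][idx] += t_lapse
--
--         answer = min(answer, result)
--
--
--     return answer
-- ===== SOURCE B (Python) =====
-- def solution(k, n, reqs):
--     INF = 10 ** 9
--     if k > n:
--         # fewer counselors than types: no feasible assignment
--         return INF
--     # group requests by counselor type (index 1..k; negative indices wrap as in Python)
--     groups = [[] for _ in range(k + 1)]
--     for t_start, t_lapse, typ in reqs:
--         groups[typ].append((t_start, t_lapse))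
--
--     def wait(jobs, c):
--         free = [0] * c
--         total = 0
--         for s, d in jobs:
--             v = min(free)
--             i = free.index(v)
--             if v <= s:
--                 free[i] = s + d
--             else:
--                 total += v - s
--                 free[i] = v + d
--         return total
--
--     maxc = n - (k - 1)
--     # cost[t][c]: total wait of type t served by c counselors (computed once per (t, c))
--     cost = [[0] * (maxc + 1)]
--     for t in range(1, k + 1):
--         cost.append([0] + [wait(groups[t], c) for c in range(1, maxc + 1)])
--
--     # knapsack DP over types: best[m] = minimal total wait using m counselors
--     # for types handled so far (None = impossible)
--     best = [0] + [None] * n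
--     for t in range(1, k + 1):
--         nxt = [None] * (n + 1)
--         for m in range(1, n + 1):
--             b = None
--             for c in range(1, min(m, maxc) + 1):
--                 p = best[m - c]
--                 if p is not None:
--                     cand = p + cost[t][c]
--                     if b is None or cand < b:
--                         b = cand
--             nxt[m] = b
--         best = nxt
--     return min(INF, best[n])
-- ===== Notes on version B (the rewrite author's own statement) =====
-- stated objective: faster
-- what changed: A re-simulates the full request stream for every composition of n counselors over k types (C(n-1,k-1) full simulations); B groups requests by type once, precomputes the wait cost of each type for each counselor count, and combines the tables with a knapsack DP over the types.
-- outside the precondition, e.g. on solution(1, 0, []): A returns 0, B returns 1000000000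
import Mathlib
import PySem

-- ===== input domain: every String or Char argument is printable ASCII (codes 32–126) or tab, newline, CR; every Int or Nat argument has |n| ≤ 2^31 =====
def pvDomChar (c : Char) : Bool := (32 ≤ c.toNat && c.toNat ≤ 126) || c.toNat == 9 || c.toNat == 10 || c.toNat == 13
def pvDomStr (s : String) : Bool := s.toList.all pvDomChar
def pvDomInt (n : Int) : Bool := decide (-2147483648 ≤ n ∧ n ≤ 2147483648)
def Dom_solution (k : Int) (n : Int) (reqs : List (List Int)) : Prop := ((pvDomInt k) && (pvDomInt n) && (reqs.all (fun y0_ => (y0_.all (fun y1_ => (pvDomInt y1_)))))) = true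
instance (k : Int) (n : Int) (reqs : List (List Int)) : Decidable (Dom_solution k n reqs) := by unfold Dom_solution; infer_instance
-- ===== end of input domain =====

-- B replaces A's exhaustive simulation of every counselor distribution (re-running all
-- requests per distribution) by per-type cost tables plus a knapsack DP over the types.

-- ===== PORT A =====
-- inner loop body: one request served (the `for t_start, t_lapse, typ in reqs` body)
def aReqStep (st : Int × List (List Int)) (req : List Int) : Int × List (List Int) :=
  match req with
  | [t_start, t_lapse, typ] =>
    let lst := (PySem.List.pyGet? st.2 typ).getD []
    let v := (PySem.List.min? lst (fun x => x)).getD 0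
    let idx := (PySem.List.index? lst v).getD 0
    if v ≤ t_start then
      (st.1, PySem.List.pySetD st.2 typ (lst.set idx (t_start + t_lapse)))
    else
      (st.1 + (lst.getD idx 0 - t_start),
       PySem.List.pySetD st.2 typ (lst.set idx (lst.getD idx 0 + t_lapse)))
  | _ => st  -- Python raises on a malformed row; such inputs are outside Pre_

-- `for idx, s in enumerate(comb): mentors[idx+1] = [0]*(s-e); e = s`
def aCutStep (p : Int × List (List Int)) (is_ : Int × Int) : Int × List (List Int) :=
  (is_.2, PySem.List.pySetD p.2 (is_.1 + 1) (List.replicate (is_.2 - p.1).toNat (0 : Int)))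

-- the body of `for comb in combinations(range(1, n), k-1)`
def aCombStep (k : Int) (n : Int) (reqs : List (List Int))
    (st : Int × List (List Int)) (comb : List Int) : Int × List (List Int) :=
  let mentors :=
    if 1 < k then
      let p := (PySem.List.enumerate comb).foldl aCutStep (0, st.2)
      PySem.List.pySetD p.2 (-1) (List.replicate (n - p.1).toNat (0 : Int))  -- mentors[-1] = [0]*(n-s)
    else if k ≠ 0 then
      PySem.List.pySetD st.2 1 (List.replicate n.toNat (0 : Int))
    else st.2
  let r := reqs.foldl aReqStep (0, mentors)
  (min st.1 r.1, r.2)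

def solution (k : Int) (n : Int) (reqs : List (List Int)) : Int :=
  -- answer = int(1e9); mentors = [[] for _ in range(k+1)]
  -- itertools.combinations(range(1, n), k-1): CPython checks `r > n` upfront and yields
  -- nothing; the same upfront check keeps this port evaluable (the value is identical).
  let combos :=
    if (k - 1).toNat ≤ (PySem.List.pyRange 1 n 1).length then
      PySem.List.combinations (PySem.List.pyRange 1 n 1) (k - 1).toNat
    else []
  (combos.foldl (aCombStep k n reqs) ((1000000000 : Int), List.replicate (k + 1).toNat [])).1

-- ===== PORT B =====
-- body of B's wait() loop
def waitStep (st : List Int × Int) (sd : Int × Int) : List Int × Int :=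
  let v := (PySem.List.min? st.1 (fun x => x)).getD 0
  let i := (PySem.List.index? st.1 v).getD 0
  if v ≤ sd.1 then (st.1.set i (sd.1 + sd.2), st.2)
  else (st.1.set i (v + sd.2), st.2 + (v - sd.1))

-- helper of B: wait(jobs, c) — total wait of `jobs` served by `c` counselors
def waitAlt (jobs : List (Int × Int)) (c : Nat) : Int :=
  (jobs.foldl waitStep (List.replicate c (0 : Int), (0 : Int))).2

-- `groups[typ].append((t_start, t_lapse))`
def groupStep (g : List (List (Int × Int))) (req : List Int) : List (List (Int × Int)) :=
  match req with
  | [t_start, t_lapse, typ] =>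
    PySem.List.pySetD g typ (((PySem.List.pyGet? g typ).getD []) ++ [(t_start, t_lapse)])
  | _ => g  -- Python raises on a malformed row; such inputs are outside Pre_

-- Python-list indexing a[i] on the DP tables (arrays model Python's O(1) lists;
-- every read B performs has 0 ≤ i < len, where this is exact — B never reads
-- a negative or out-of-range index on these tables)
def aGetD {α : Type} (a : Array α) (i : Int) (d : α) : α :=
  if 0 ≤ i then a.getD i.toNat d else d

-- innermost DP loop: `for c in range(1, min(m, maxc)+1): …`
def dpCell (cost : Array (Array Int)) (maxc : Int) (best : Array (Option Int))
    (t : Int) (m : Int) : Option Int :=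
  (PySem.List.pyRange 1 (min m maxc + 1) 1).foldl (fun b c =>
    match aGetD best (m - c) none with
    | none => b
    | some p =>
      let cand := p + aGetD (aGetD cost t #[]) c 0
      match b with
      | none => some cand
      | some bv => if cand < bv then some cand else b) none

def solution_alt (k : Int) (n : Int) (reqs : List (List Int)) : Int :=
  let INF : Int := 1000000000
  if k > n then INF
  else
    let groups : List (List (Int × Int)) :=
      reqs.foldl groupStep (List.replicate (k + 1).toNat [])
    let maxc : Int := n - (k - 1)
    -- cost[t] = [0] + [wait(groups[t], c) for c in 1..maxc]
    let cost : Array (Array Int) :=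
      ((List.replicate (maxc + 1).toNat (0 : Int)).toArray ::
        (PySem.List.pyRange 1 (k + 1) 1).map (fun t =>
          ((0 : Int) :: (PySem.List.pyRange 1 (maxc + 1) 1).map (fun c =>
            waitAlt ((PySem.List.pyGet? groups t).getD []) c.toNat)).toArray)).toArray
    -- knapsack DP over the types
    let best := (PySem.List.pyRange 1 (k + 1) 1).foldl (fun best t =>
        ((none : Option Int) :: (PySem.List.pyRange 1 (n + 1) 1).map
          (fun m => dpCell cost maxc best t m)).toArray)
      ((some (0 : Int)) :: List.replicate n.toNat (none : Option Int)).toArray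
    match aGetD best n none with
    | some v => min INF v
    | none => INF  -- unreachable under Pre_ (there the DP entry is always filled)

-- ===== PRECONDITION & SPEC =====
-- Pre_ excludes inputs where A raises (k ≤ 0: ValueError; a malformed or invalidly-typed
-- request row reached by the simulation: IndexError/ValueError/TypeError), and the degenerate
-- corner k = 1 ∧ n ≤ 0, where A accidentally returns 0 for reqs = [] via an empty counselor
-- pool (and raises otherwise) while B reports infeasibility — both values are defensible there.
def Pre_solution (k : Int) (n : Int) (reqs : List (List Int)) : Prop :=
  1 ≤ k ∧ (k = 1 → 1 ≤ n) ∧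
  (k ≤ n → ∀ r ∈ reqs, r.length = 3 ∧
     (1 ≤ r.getD 2 0 ∧ r.getD 2 0 ≤ k ∨ -k ≤ r.getD 2 0 ∧ r.getD 2 0 ≤ -1))
instance (k : Int) (n : Int) (reqs : List (List Int)) : Decidable (Pre_solution k n reqs) := by
  unfold Pre_solution; infer_instance

def pvWitness_solution : Int × Int × List (List Int) := (2, 3, [[0, 5, 1], [1, 2, 2], [3, 4, 1]])

def Spec_solution (k : Int) (n : Int) (reqs : List (List Int)) (out : Int) : Prop := out = solution_alt k n reqs
instance (k : Int) (n : Int) (reqs : List (List Int)) (out : Int) : Decidable (Spec_solution k n reqs out) := by unfold Spec_solution; infer_instance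

-- ===== CLAIM (what is proved, stated in full; the proofs are below) =====
def Claim_equal_solution : Prop := ∀ (k : Int) (n : Int) (reqs : List (List Int)), Dom_solution k n reqs → Pre_solution k n reqs → Spec_solution k n reqs (solution k n reqs)

-- ===== LEMMAS AND PROOFS =====

-- the effective (wrapped) type index of a request, as Python's negative indexing resolves it
def effIdx (k t : Int) : Nat := if t < 0 then (t + k + 1).toNat else t.toNat

def ReqOk (k : Int) (r : List Int) : Prop :=
  r.length = 3 ∧ (1 ≤ r.getD 2 0 ∧ r.getD 2 0 ≤ k ∨ -k ≤ r.getD 2 0 ∧ r.getD 2 0 ≤ -1)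

-- the requests of effective type j, in order, as (start, lapse) pairs
def jobsOf (k : Int) (j : Nat) (reqs : List (List Int)) : List (Int × Int) :=
  (reqs.filter (fun r => effIdx k (r.getD 2 0) == j)).map (fun r => (r.getD 0 0, r.getD 1 0))

-- total wait of `jobs` on a free-list f (same loop as waitStep)
def simT (f : List Int) (jobs : List (Int × Int)) : Int := (jobs.foldl waitStep (f, 0)).2

-- per-type cost: type j with c counselors
def cst (k : Int) (reqs : List (List Int)) (j : Nat) (c : Int) : Int :=
  waitAlt (jobsOf k j reqs) c.toNat

-- cost of a distribution cs = [c_1, …, c_t] (c_i counselors for type i)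
def costSum (k : Int) (reqs : List (List Int)) (cs : List Int) : Int :=
  ∑ i ∈ Finset.range cs.length, cst k reqs (i + 1) (cs.getD i 0)

-- the part sizes a combination of cut points describes
def partsOf (n : Int) (comb : List Int) : List Int :=
  List.zipWith (· - ·) (comb ++ [n]) ((0 : Int) :: comb)

def validComp (k : Int) (maxc : Int) (t : Nat) (m : Int) (cs : List Int) : Prop :=
  cs.length = t ∧ (∀ c ∈ cs, 1 ≤ c ∧ c ≤ maxc) ∧ cs.sum = m

-- the DP recurrence (proof-side model of B's table)
def mc (k : Int) (reqs : List (List Int)) (maxc : Int) : Nat → Int → Option Int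
  | 0, m => if m = 0 then some 0 else none
  | t + 1, m =>
    (PySem.List.pyRange 1 (min m maxc + 1) 1).foldl (fun b c =>
      match mc k reqs maxc t (m - c) with
      | none => b
      | some p =>
        let cand := p + cst k reqs (t + 1) c
        match b with
        | none => some cand
        | some bv => if cand < bv then some cand else b) none

-- ==== low-level lemmas ====

lemma getD_minIdx (l : List Int) :
    l.getD ((PySem.List.index? l ((PySem.List.min? l (fun x => x)).getD 0)).getD 0) 0
      = (PySem.List.min? l (fun x => x)).getD 0 := by
  cases l with
  | nil => simp [PySem.List.min?]
  | cons x t =>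
    obtain ⟨m, hm⟩ : ∃ m, PySem.List.min? (x :: t) (fun x => x) = some m :=
      ⟨_, PySem.List.min?_id_cons x t⟩
    rw [hm, Option.getD_some]
    have hmem : m ∈ x :: t := PySem.List.min?_mem hm
    have hsome : (PySem.List.index? (x :: t) m).isSome :=
      (PySem.List.index?_isSome_iff _ _).mpr hmem
    obtain ⟨i, hi⟩ := Option.isSome_iff_exists.mp hsome
    obtain ⟨hk, hval, _⟩ := PySem.List.getElem_of_index?_eq_some hi
    rw [hi, Option.getD_some, List.getD_eq_getElem _ _ hk, hval]

lemma waitStep_shift (f : List Int) (t : Int) (sd : Int × Int) :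
    waitStep (f, t) sd = ((waitStep (f, 0) sd).1, t + (waitStep (f, 0) sd).2) := by
  simp only [waitStep]
  split <;> (simp; try ring)

lemma foldl_waitStep_shift (jobs : List (Int × Int)) : ∀ (f : List Int) (t : Int),
    jobs.foldl waitStep (f, t)
      = ((jobs.foldl waitStep (f, 0)).1, t + (jobs.foldl waitStep (f, 0)).2) := by
  induction jobs with
  | nil => intro f t; simp
  | cons sd jobs ih =>
    intro f t
    simp only [List.foldl_cons]
    rw [waitStep_shift f t sd, ih, ih (waitStep (f, 0) sd).1 (waitStep (f, 0) sd).2]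
    simp; ring

lemma effIdx_bounds (k t : Int) (hk : 1 ≤ k)
    (ht : 1 ≤ t ∧ t ≤ k ∨ -k ≤ t ∧ t ≤ -1) :
    1 ≤ effIdx k t ∧ effIdx k t ≤ k.toNat := by
  unfold effIdx
  split <;> omega

lemma pyGet?_wrap {α : Type} (m : List α) (k t : Int) (hk : 1 ≤ k)
    (hlen : m.length = (k + 1).toNat)
    (ht : 1 ≤ t ∧ t ≤ k ∨ -k ≤ t ∧ t ≤ -1) :
    PySem.List.pyGet? m t = m[effIdx k t]? := by
  unfold PySem.List.pyGet? PySem.List.pyIdx? effIdx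
  rcases ht with ⟨h1, h2⟩ | ⟨h1, h2⟩
  · have h0 : 0 ≤ t := by omega
    simp only [if_pos h0]
    rw [if_pos (by omega : t < (m.length : Int))]
    simp only [Option.bind_some]
    rw [if_neg (by omega : ¬ t < 0)]
  · have h0 : ¬ 0 ≤ t := by omega
    rw [if_neg h0, if_pos (by omega : -(m.length : Int) ≤ t)]
    simp only [Option.bind_some]
    rw [if_pos (by omega : t < 0)]
    congr 1
    omega

lemma pySetD_wrap {α : Type} (m : List α) (k t : Int) (x : α) (hk : 1 ≤ k)
    (hlen : m.length = (k + 1).toNat)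
    (ht : 1 ≤ t ∧ t ≤ k ∨ -k ≤ t ∧ t ≤ -1) :
    PySem.List.pySetD m t x = m.set (effIdx k t) x := by
  unfold PySem.List.pySetD PySem.List.pySet? PySem.List.pyIdx?
  rcases ht with ⟨h1, h2⟩ | ⟨h1, h2⟩
  · have h0 : 0 ≤ t := by omega
    simp only [if_pos h0]
    rw [if_pos (by omega : t < (m.length : Int))]
    simp only [Option.map_some, Option.getD_some]
    unfold effIdx
    rw [if_neg (by omega : ¬ t < 0)]
  · have h0 : ¬ 0 ≤ t := by omega
    rw [if_neg h0, if_pos (by omega : -(m.length : Int) ≤ t)]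
    simp only [Option.map_some, Option.getD_some]
    congr 1
    unfold effIdx
    rw [if_pos (by omega : t < 0)]
    omega


lemma getD_set_list {α : Type} (l : List α) (i j : Nat) (a : α) (d : α) (hi : i < l.length) :
    (l.set i a).getD j d = if i = j then a else l.getD j d := by
  rw [List.getD_eq_getElem?_getD, List.getElem?_set, List.getD_eq_getElem?_getD]
  split
  · simp
  · rfl

-- one A-step on a well-formed row, expressed through waitStep on the row's type component
lemma aReqStep_eq (k : Int) (hk : 1 ≤ k) (m : List (List Int)) (hm : m.length = (k + 1).toNat)
    (r0 a b t : Int) (ht : 1 ≤ t ∧ t ≤ k ∨ -k ≤ t ∧ t ≤ -1) :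
    aReqStep (r0, m) [a, b, t]
      = (r0 + (waitStep (m.getD (effIdx k t) [], 0) (a, b)).2,
         m.set (effIdx k t) (waitStep (m.getD (effIdx k t) [], 0) (a, b)).1) := by
  have hg : (PySem.List.pyGet? m t).getD [] = m.getD (effIdx k t) [] := by
    rw [pyGet?_wrap m k t hk hm ht, List.getD_eq_getElem?_getD]
  simp only [aReqStep, waitStep, hg, pySetD_wrap m k t _ hk hm ht, getD_minIdx]
  split <;> (simp; try ring)

-- ==== decomposition: A's interleaved simulation is the sum of per-type simulations ====

lemma decompA (k : Int) (hk : 1 ≤ k) :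
    ∀ (reqs : List (List Int)), (∀ r ∈ reqs, ReqOk k r) →
    ∀ (m : List (List Int)) (r0 : Int), m.length = (k + 1).toNat →
    (reqs.foldl aReqStep (r0, m)).1
      = r0 + ∑ j ∈ Finset.range k.toNat, simT (m.getD (j + 1) []) (jobsOf k (j + 1) reqs) := by
  intro reqs
  induction reqs with
  | nil => intro _ m r0 _; simp [simT, jobsOf]
  | cons r rs ih =>
    intro hok m r0 hm
    obtain ⟨hlen3, htyp⟩ := hok r (List.mem_cons_self ..)
    obtain ⟨a, b, t, rfl⟩ : ∃ a b t, r = [a, b, t] := by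
      match r, hlen3 with
      | [a, b, t], _ => exact ⟨a, b, t, rfl⟩
    simp only [List.getD] at htyp
    simp only [List.getElem?_cons_succ, List.getElem?_cons_zero, Option.getD_some] at htyp
    set j0 := effIdx k t with hj0def
    obtain ⟨hj1, hj2⟩ := effIdx_bounds k t hk htyp
    set w := (waitStep (m.getD j0 [], 0) (a, b)).2 with hw
    set f' := (waitStep (m.getD j0 [], 0) (a, b)).1 with hf'
    have hstep : aReqStep (r0, m) [a, b, t] = (r0 + w, m.set j0 f') :=
      aReqStep_eq k hk m hm r0 a b t htyp
    have hm' : (m.set j0 f').length = (k + 1).toNat := by simp [hm]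
    have ihs := ih (fun r hr => hok r (List.mem_cons_of_mem _ hr)) (m.set j0 f') (r0 + w) hm'
    simp only [List.foldl_cons, hstep, ihs]
    -- rewrite both sums to an ite form and compare
    have hj0lt : j0 - 1 < m.length := by omega
    have hgset : ∀ j ∈ Finset.range k.toNat,
        (m.set j0 f').getD (j + 1) [] = if j = j0 - 1 then f' else m.getD (j + 1) [] := by
      intro j _
      rw [getD_set_list m j0 (j + 1) f' [] (by omega)]
      by_cases hcase : j = j0 - 1
      · rw [if_pos (by omega), if_pos hcase]
      · rw [if_neg (by omega), if_neg hcase]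
    have hjobs : ∀ j : Nat, jobsOf k (j + 1) ([a, b, t] :: rs)
        = if j = j0 - 1 then (a, b) :: jobsOf k (j + 1) rs else jobsOf k (j + 1) rs := by
      intro j
      unfold jobsOf
      by_cases hcase : j = j0 - 1
      · rw [if_pos hcase]
        rw [List.filter_cons_of_pos (by simp [List.getD]; omega)]
        simp [List.getD]
      · rw [if_neg hcase]
        rw [List.filter_cons_of_neg (by simp [List.getD]; omega)]
    have hsim : ∀ jobs : List (Int × Int), simT (m.getD j0 []) ((a, b) :: jobs) = w + simT f' jobs := by
      intro jobs
      unfold simT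
      rw [List.foldl_cons]
      have : waitStep (m.getD j0 [], 0) (a, b) = (f', w) := by rw [hw, hf']
      rw [this, foldl_waitStep_shift jobs f' w]
    calc r0 + w + ∑ j ∈ Finset.range k.toNat, simT ((m.set j0 f').getD (j + 1) []) (jobsOf k (j + 1) rs)
        = r0 + w + ∑ j ∈ Finset.range k.toNat,
            (if j = j0 - 1 then simT f' (jobsOf k (j + 1) rs)
             else simT (m.getD (j + 1) []) (jobsOf k (j + 1) rs)) := by
          congr 1
          refine Finset.sum_congr rfl (fun j hj => ?_)
          rw [hgset j hj]
          by_cases hcase : j = j0 - 1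
          · rw [if_pos hcase, if_pos hcase]
          · rw [if_neg hcase, if_neg hcase]
      _ = r0 + ∑ j ∈ Finset.range k.toNat,
            simT (m.getD (j + 1) []) (jobsOf k (j + 1) ([a, b, t] :: rs)) := by
          have hsum : ∀ j ∈ Finset.range k.toNat,
              simT (m.getD (j + 1) []) (jobsOf k (j + 1) ([a, b, t] :: rs))
                = (if j = j0 - 1 then simT f' (jobsOf k (j + 1) rs)
                   else simT (m.getD (j + 1) []) (jobsOf k (j + 1) rs))
                  + (if j = j0 - 1 then w else 0) := by
            intro j _
            rw [hjobs j]
            by_cases hcase : j = j0 - 1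
            · rw [if_pos hcase, if_pos hcase, if_pos hcase]
              have hj0 : j + 1 = j0 := by omega
              rw [hj0, hsim]
              ring
            · rw [if_neg hcase, if_neg hcase, if_neg hcase]
              ring
          rw [Finset.sum_congr rfl hsum, Finset.sum_add_distrib]
          rw [Finset.sum_ite_eq' (Finset.range k.toNat) (j0 - 1) (fun _ => w)]
          rw [if_pos (Finset.mem_range.mpr (by omega))]
          ring

lemma lengthA (reqs : List (List Int)) : ∀ (m : List (List Int)) (r0 : Int),
    (reqs.foldl aReqStep (r0, m)).2.length = m.length := by
  induction reqs with
  | nil => intro m r0; rfl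
  | cons r rs ih =>
    intro m r0
    have h : (aReqStep (r0, m) r).2.length = m.length := by
      unfold aReqStep
      match r with
      | [] => rfl
      | [_] => rfl
      | [_, _] => rfl
      | (_ :: _ :: _ :: _ :: _) => rfl
      | [a, b, t] =>
        simp only
        split <;> simp [PySem.List.length_pySetD]
    exact (ih (aReqStep (r0, m) r).2 (aReqStep (r0, m) r).1).trans h

lemma pySetD_neg_one {α : Type} (l : List α) (x : α) (h : 0 < l.length) :
    PySem.List.pySetD l (-1) x = l.set (l.length - 1) x := by
  unfold PySem.List.pySetD PySem.List.pySet? PySem.List.pyIdx?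
  rw [if_neg (by omega), if_pos (by omega)]
  simp

lemma zipWith_sub_getD (comb : List Int) : ∀ (i : Nat) (a z : Int), i < comb.length →
    (List.zipWith (· - ·) (comb ++ [z]) (a :: comb)).getD i 0
      = comb.getD i 0 - (if i = 0 then a else comb.getD (i - 1) 0) := by
  induction comb with
  | nil => intro i a z hi; simp at hi
  | cons x xs ih =>
    intro i a z hi
    cases i with
    | zero => simp
    | succ i' =>
      simp only [List.cons_append, List.zipWith_cons_cons, List.getD_cons_succ]
      rw [ih i' x z (by simp at hi; omega), if_neg (Nat.succ_ne_zero i'), Nat.succ_sub_one]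
      cases i' with
      | zero => simp
      | succ i'' => rw [if_neg (Nat.succ_ne_zero i''), Nat.succ_sub_one, List.getD_cons_succ]

lemma zipWith_sub_last (comb : List Int) : ∀ (a z : Int),
    (List.zipWith (· - ·) (comb ++ [z]) (a :: comb)).getD comb.length 0 = z - comb.getLastD a := by
  induction comb with
  | nil => intro a z; simp
  | cons x xs ih =>
    intro a z
    simp only [List.cons_append, List.zipWith_cons_cons, List.length_cons, List.getD_cons_succ]
    rw [ih x z, ← List.getLastD_cons]

lemma length_partsOf (n : Int) (comb : List Int) : (partsOf n comb).length = comb.length + 1 := by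
  unfold partsOf
  simp

-- ==== the mentors list built from a combination ====

lemma buildFold (comb : List Int) : ∀ (s : Nat) (e0 : Int) (m0 : List (List Int)),
    s + comb.length < m0.length →
    (((PySem.List.enumerate comb (s : Int)).foldl aCutStep (e0, m0)).1 = comb.getLastD e0) ∧
    ((PySem.List.enumerate comb (s : Int)).foldl aCutStep (e0, m0)).2.length = m0.length ∧
    (∀ j : Nat, (j < s + 1 ∨ s + comb.length < j) →
      ((PySem.List.enumerate comb (s : Int)).foldl aCutStep (e0, m0)).2.getD j []
        = m0.getD j []) ∧
    (∀ i : Nat, i < comb.length →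
      ((PySem.List.enumerate comb (s : Int)).foldl aCutStep (e0, m0)).2.getD (s + 1 + i) []
        = List.replicate ((comb.getD i 0 - (if i = 0 then e0 else comb.getD (i - 1) 0)).toNat) (0 : Int)) := by
  induction comb with
  | nil =>
    intro s e0 m0 _
    refine ⟨rfl, rfl, fun j _ => rfl, fun i hi => by simp at hi⟩
  | cons x xs ih =>
    intro s e0 m0 hlen
    rw [PySem.List.enumerate_cons, List.foldl_cons]
    have hm1 : aCutStep (e0, m0) ((s : Int), x)
        = (x, m0.set (s + 1) (List.replicate (x - e0).toNat (0 : Int))) := by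
      unfold aCutStep
      simp only
      rw [show ((s : Int) + 1) = ((s + 1 : Nat) : Int) by push_cast; ring,
          PySem.List.pySetD_natCast]
    rw [show ((s : Int) + 1) = ((s + 1 : Nat) : Int) by push_cast; ring, hm1]
    set m1 := m0.set (s + 1) (List.replicate (x - e0).toNat (0 : Int)) with hm1def
    have hlen1 : m1.length = m0.length := by simp [hm1def]
    have hlt : s + 1 + xs.length < m1.length := by
      rw [hlen1]; simp at hlen; omega
    obtain ⟨hl, hlen2, huntouched, hparts⟩ := ih (s + 1) x m1 hlt
    have hs1 : s + 1 < m0.length := by simp at hlen; omega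
    refine ⟨by rw [hl, ← List.getLastD_cons], by rw [hlen2, hlen1],
      fun j hj => ?_, fun i hi => ?_⟩
    · rw [huntouched j (by simp at hj ⊢; omega)]
      rw [hm1def, getD_set_list m0 (s + 1) j _ [] hs1, if_neg (by simp at hj; omega)]
    · match i with
      | 0 =>
        rw [show s + 1 + 0 = s + 1 by omega]
        rw [huntouched (s + 1) (by omega)]
        rw [hm1def, getD_set_list m0 (s + 1) (s + 1) _ [] hs1, if_pos rfl]
        simp
      | Nat.succ i' =>
        have h2 := hparts i' (by simp at hi; omega)
        rw [show s + 1 + (i' + 1) = s + 1 + 1 + i' by omega, h2,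
            if_neg (Nat.succ_ne_zero i'), Nat.succ_sub_one, List.getD_cons_succ]
        cases i' with
        | zero => rw [if_pos rfl]; rfl
        | succ i'' => rw [if_neg (Nat.succ_ne_zero i''), Nat.succ_sub_one, List.getD_cons_succ]

lemma buildMentors (k n : Int) (hk1 : 1 < k) (comb : List Int)
    (hlen : comb.length = (k - 1).toNat)
    (m0 : List (List Int)) (hm : m0.length = (k + 1).toNat) :
    (PySem.List.pySetD
        ((PySem.List.enumerate comb).foldl aCutStep (0, m0)).2 (-1)
        (List.replicate (n - ((PySem.List.enumerate comb).foldl aCutStep (0, m0)).1).toNat (0 : Int))).length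
      = (k + 1).toNat ∧
    ∀ j : Nat, 1 ≤ j → j ≤ k.toNat →
      (PySem.List.pySetD
        ((PySem.List.enumerate comb).foldl aCutStep (0, m0)).2 (-1)
        (List.replicate (n - ((PySem.List.enumerate comb).foldl aCutStep (0, m0)).1).toNat (0 : Int))).getD j []
        = List.replicate ((partsOf n comb).getD (j - 1) 0).toNat (0 : Int) := by
  have hK : 2 ≤ k.toNat := by omega
  have hlt : 0 + comb.length < m0.length := by rw [hm]; omega
  obtain ⟨hl, hlen2, huntouched, hparts⟩ := buildFold comb 0 0 m0 hlt
  have hcast : ((0 : Nat) : Int) = (0 : Int) := rfl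
  rw [hcast] at hl hlen2 huntouched hparts
  set p := (PySem.List.enumerate comb).foldl aCutStep (0, m0) with hp
  have hplen : p.2.length = (k + 1).toNat := by rw [hlen2, hm]
  rw [pySetD_neg_one p.2 _ (by omega)]
  have hKidx : p.2.length - 1 = k.toNat := by omega
  rw [hKidx]
  constructor
  · simp [hplen]
  · intro j hj1 hj2
    rw [getD_set_list p.2 k.toNat j _ [] (by omega)]
    by_cases hcase : j = k.toNat
    · rw [if_pos hcase.symm, hcase, hl]
      unfold partsOf
      have hjl : k.toNat - 1 = comb.length := by omega
      rw [hjl, zipWith_sub_last]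
    · rw [if_neg (by omega)]
      have hi : j - 1 < comb.length := by omega
      have := hparts (j - 1) hi
      rw [show 0 + 1 + (j - 1) = j by omega] at this
      rw [this]
      unfold partsOf
      rw [zipWith_sub_getD comb (j - 1) 0 n hi]


-- ==== combinations ↔ compositions ====

lemma zipWith_sub_sum (l : List Int) : ∀ (a z : Int),
    (List.zipWith (· - ·) (l ++ [z]) (a :: l)).sum = z - a := by
  induction l with
  | nil => intro a z; simp
  | cons x xs ih =>
    intro a z
    simp only [List.cons_append, List.zipWith_cons_cons, List.sum_cons, ih x z]
    ring

lemma zipWith_sub_pos (l : List Int) : ∀ (a z : Int), l.Pairwise (· < ·) →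
    (∀ x ∈ l, a < x ∧ x < z) → a < z →
    ∀ c ∈ List.zipWith (· - ·) (l ++ [z]) (a :: l), 1 ≤ c := by
  induction l with
  | nil =>
    intro a z _ _ haz c hc
    simp at hc
    omega
  | cons x xs ih =>
    intro a z hpw hb haz c hc
    simp only [List.cons_append, List.zipWith_cons_cons, List.mem_cons] at hc
    rcases hc with rfl | hc
    · have := (hb x (by simp)).1
      omega
    · refine ih x z (hpw.sublist (List.sublist_cons_self x xs)) ?_ ?_ c hc
      · intro y hy
        exact ⟨(List.pairwise_cons.mp hpw).1 y hy, (hb y (by simp [hy])).2⟩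
      · exact (hb x (by simp)).2

lemma le_sum_of_all_ge_one (l : List Int) (h : ∀ x ∈ l, 1 ≤ x) :
    ∀ c ∈ l, c + ((l.length : Int) - 1) ≤ l.sum := by
  induction l with
  | nil => intro c hc; simp at hc
  | cons x xs ih =>
    intro c hc
    have hxs : ∀ y ∈ xs, (1 : Int) ≤ y := fun y hy => h y (by simp [hy])
    have hsum : (xs.length : Int) ≤ xs.sum := by
      clear ih h hc
      induction xs with
      | nil => simp
      | cons y ys ihy =>
        simp only [List.length_cons, List.sum_cons]
        have := hxs y (by simp)
        have := ihy (fun z hz => hxs z (by simp [hz]))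
        push_cast
        omega
    rcases List.mem_cons.mp hc with rfl | hc
    · simp only [List.sum_cons, List.length_cons]
      push_cast
      omega
    · have := ih hxs c hc
      have hx := h x (by simp)
      simp only [List.sum_cons, List.length_cons]
      push_cast at this ⊢
      omega

lemma sublist_range_of_pairwise (l : List Int) : ∀ (a b : Int), l.Pairwise (· < ·) →
    (∀ x ∈ l, a ≤ x ∧ x < b) → l.Sublist (PySem.List.pyRange a b 1) := by
  induction l with
  | nil => intro a b _ _; exact List.nil_sublist _
  | cons x xs ih =>
    intro a b hpw hbd
    have hxb : x < b := (hbd x (by simp)).2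
    have hax : a ≤ x := (hbd x (by simp)).1
    have hsplit : PySem.List.pyRange a b 1
        = PySem.List.pyRange a x 1 ++ PySem.List.pyRange x b 1 :=
      PySem.List.pyRange_one_append a x b hax (by omega)
    rw [hsplit, PySem.List.pyRange_one_cons hxb]
    have hxs : xs.Sublist (PySem.List.pyRange (x + 1) b 1) := by
      refine ih (x + 1) b (hpw.sublist (List.sublist_cons_self x xs)) (fun y hy => ?_)
      exact ⟨by have := (List.pairwise_cons.mp hpw).1 y hy; omega, (hbd y (by simp [hy])).2⟩
    exact List.Sublist.append (List.nil_sublist _) (List.cons_sublist_cons.mpr hxs)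

lemma comps_to_comb (cs : List Int) : cs ≠ [] → (∀ c ∈ cs, 1 ≤ c) → ∀ a : Int,
    ∃ comb : List Int, comb.Pairwise (· < ·) ∧ comb.length + 1 = cs.length ∧
      (∀ x ∈ comb, a + 1 ≤ x ∧ x ≤ a + cs.sum - 1) ∧
      List.zipWith (· - ·) (comb ++ [a + cs.sum]) (a :: comb) = cs := by
  induction cs with
  | nil => intro h; exact absurd rfl h
  | cons c cs ih =>
    intro _ hge a
    rcases cs with _ | ⟨c2, cs'⟩
    · refine ⟨[], List.Pairwise.nil, by simp, by simp, by simp⟩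
    · obtain ⟨comb', hpw', hlen', hbd', heq'⟩ :=
        ih (by simp) (fun x hx => hge x (by simp [List.mem_cons] at hx ⊢; tauto)) (a + c)
      have hc1 : 1 ≤ c := hge c (by simp)
      have hsumpos : 1 ≤ (c2 :: cs').sum := by
        have h2 : 1 ≤ c2 := hge c2 (by simp)
        have hs : (0 : Int) ≤ cs'.sum :=
          List.sum_nonneg (fun y hy => by have := hge y (by simp [hy]); omega)
        simp only [List.sum_cons]; omega
      refine ⟨(a + c) :: comb', ?_, by simpa using hlen', ?_, ?_⟩
      · refine List.pairwise_cons.mpr ⟨fun y hy => by have := (hbd' y hy).1; omega, hpw'⟩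
      · intro x hx
        simp only [List.sum_cons] at hsumpos ⊢
        rcases List.mem_cons.mp hx with rfl | hx
        · omega
        · obtain ⟨h1, h2⟩ := hbd' x hx
          simp only [List.sum_cons] at h2
          omega
      · simp only [List.cons_append, List.zipWith_cons_cons]
        rw [show a + c - a = c by ring,
            show a + (c :: c2 :: cs').sum = (a + c) + (c2 :: cs').sum by
              simp only [List.sum_cons]; ring]
        rw [heq'] 

-- partsOf of a member of A's combination list is a valid composition
lemma partsOf_valid (k n : Int) (hk : 1 ≤ k) (hkn : k ≤ n) (comb : List Int)
    (hmem : comb ∈ PySem.List.combinations (PySem.List.pyRange 1 n 1) (k - 1).toNat) :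
    validComp k (n - (k - 1)) k.toNat n (partsOf n comb) := by
  obtain ⟨hsub, hlen⟩ := (PySem.List.mem_combinations_iff _ _ _).mp hmem
  have hpw : comb.Pairwise (· < ·) :=
    (PySem.List.pairwise_lt_pyRange_one 1 n).sublist hsub
  have hbd : ∀ x ∈ comb, 1 ≤ x ∧ x < n := by
    intro x hx
    exact PySem.List.mem_pyRange_one.mp (hsub.subset hx)
  have hlenp : (partsOf n comb).length = k.toNat := by
    rw [length_partsOf, hlen]; omega
  have hpos : ∀ c ∈ partsOf n comb, 1 ≤ c := by
    unfold partsOf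
    exact zipWith_sub_pos comb 0 n hpw
      (fun x hx => ⟨by have := (hbd x hx).1; omega, (hbd x hx).2⟩) (by omega)
  have hsum : (partsOf n comb).sum = n := by
    unfold partsOf
    rw [zipWith_sub_sum]; ring
  refine ⟨hlenp, fun c hc => ⟨hpos c hc, ?_⟩, hsum⟩
  have := le_sum_of_all_ge_one (partsOf n comb) hpos c hc
  rw [hsum, hlenp] at this
  omega

-- every valid composition is realized by a member of A's combination list
lemma comp_realized (k n : Int) (hk : 1 ≤ k) (cs : List Int)
    (hv : validComp k (n - (k - 1)) k.toNat n cs) :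
    ∃ comb ∈ PySem.List.combinations (PySem.List.pyRange 1 n 1) (k - 1).toNat,
      partsOf n comb = cs := by
  obtain ⟨hlen, hbd, hsum⟩ := hv
  have hne : cs ≠ [] := by
    intro h
    rw [h] at hlen
    simp at hlen
    omega
  obtain ⟨comb, hpw, hclen, hcbd, heq⟩ := comps_to_comb cs hne (fun c hc => (hbd c hc).1) 0
  have hn1 : 1 ≤ n := by
    have : (1 : Int) ≤ (k.toNat : Int) := by omega
    have hs := hsum
    rcases cs with _ | ⟨c, cs'⟩
    · exact absurd rfl hne
    · have h1 := (hbd c (by simp)).1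
      have h2 : (0 : Int) ≤ cs'.sum :=
        List.sum_nonneg (fun y hy => by have := (hbd y (by simp [hy])).1; omega)
      simp only [List.sum_cons] at hs
      omega
  refine ⟨comb, ?_, ?_⟩
  · refine (PySem.List.mem_combinations_iff _ _ _).mpr ⟨?_, by omega⟩
    refine sublist_range_of_pairwise comb 1 n hpw (fun x hx => ?_)
    obtain ⟨h1, h2⟩ := hcbd x hx
    rw [hsum] at h2
    constructor <;> omega
  · unfold partsOf
    rw [show (0 : Int) :: comb = ((0 : Int) :: comb) from rfl]
    have : (0 : Int) + cs.sum = n := by rw [hsum]; ring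
    rw [← this]
    exact heq


-- generic "running optional minimum" fold (the shape of B's innermost loop)
def ominStep (b : Option Int) (x : Option Int) : Option Int :=
  match x with
  | none => b
  | some v =>
    match b with
    | none => some v
    | some bv => if v < bv then some v else b

lemma ominStep_le (b : Option Int) (x v : Int) (hx : ominStep b (some x) = some v) :
    v ≤ x ∧ (∀ w, b = some w → v ≤ w) := by
  unfold ominStep at hx
  match b, hx with
  | none, hx =>
    refine ⟨by simp at hx; omega, fun w hw => by simp at hw⟩
  | some bv, hx =>
    simp only at hx
    split at hx <;> (simp at hx; constructor)
    · omega
    · intro w hw; simp at hw; omega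
    · omega
    · intro w hw; simp at hw; omega

lemma ominStep_some (b : Option Int) (x : Option Int) (v : Int)
    (h : ominStep b x = some v) : b = some v ∨ x = some v := by
  unfold ominStep at h
  match x, b, h with
  | none, b, h => exact Or.inl h
  | some xv, none, h => exact Or.inr h
  | some xv, some bv, h =>
    simp only at h
    split at h
    · exact Or.inr h
    · exact Or.inl h

lemma ominFold_le (g : Int → Option Int) (l : List Int) :
    ∀ (b0 : Option Int) (c : Int) (x : Int), c ∈ l → g c = some x →
    ∃ v, l.foldl (fun b c => ominStep b (g c)) b0 = some v ∧ v ≤ x := by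
  induction l with
  | nil => intro _ _ _ hc; simp at hc
  | cons d l ih =>
    intro b0 c x hc hg
    have hmono : ∀ (b1 : Option Int) (w : Int), b1 = some w →
        ∃ v, l.foldl (fun b c => ominStep b (g c)) b1 = some v ∧ v ≤ w := by
      intro b1 w hw
      clear hc hg ih
      induction l generalizing b1 w with
      | nil => exact ⟨w, by simp [hw]⟩
      | cons e l ihe =>
        simp only [List.foldl_cons]
        cases hx : g e with
        | none =>
          refine ihe _ w ?_
          simp [hw, ominStep]
        | some xv =>
          rcases hb1 : ominStep b1 (some xv) with _ | u
          · rw [hw] at hb1; unfold ominStep at hb1; simp only at hb1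
            split at hb1 <;> simp at hb1
          · obtain ⟨hu1, hu2⟩ := ominStep_le b1 xv u hb1
            obtain ⟨v, hv1, hv2⟩ := ihe (some u) u rfl
            exact ⟨v, hv1, le_trans hv2 (hu2 w hw)⟩
    rcases List.mem_cons.mp hc with rfl | hc
    · simp only [List.foldl_cons]
      rcases hb1 : ominStep b0 (g c) with _ | u
      · rw [hg] at hb1; unfold ominStep at hb1
        match b0, hb1 with
        | none, hb1 => simp at hb1
        | some bv, hb1 => simp only at hb1; split at hb1 <;> simp at hb1
      · have hb1' := hb1
        rw [hg] at hb1'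
        obtain ⟨hu1, _⟩ := ominStep_le b0 x u hb1'
        obtain ⟨v, hv1, hv2⟩ := hmono (some u) u rfl
        exact ⟨v, hv1, le_trans hv2 hu1⟩
    · exact ih _ c x hc hg

lemma ominFold_mem (g : Int → Option Int) (l : List Int) :
    ∀ (b0 : Option Int) (v : Int), l.foldl (fun b c => ominStep b (g c)) b0 = some v →
    b0 = some v ∨ ∃ c ∈ l, g c = some v := by
  induction l with
  | nil => intro b0 v h; exact Or.inl h
  | cons d l ih =>
    intro b0 v h
    simp only [List.foldl_cons] at h
    rcases ih _ v h with h1 | ⟨c, hc, hgc⟩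
    · rcases ominStep_some b0 (g d) v h1 with h2 | h2
      · exact Or.inl h2
      · exact Or.inr ⟨d, by simp, h2⟩
    · exact Or.inr ⟨c, by simp [hc], hgc⟩

lemma costSum_concat (k : Int) (reqs : List (List Int)) (cs : List Int) (c : Int) :
    costSum k reqs (cs ++ [c]) = costSum k reqs cs + cst k reqs (cs.length + 1) c := by
  unfold costSum
  rw [List.length_append, List.length_singleton, Finset.sum_range_succ]
  congr 1
  · refine Finset.sum_congr rfl (fun i hi => ?_)
    rw [List.getD_eq_getElem?_getD, List.getD_eq_getElem?_getD,
        List.getElem?_append_left (by exact Finset.mem_range.mp hi)]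
  · rw [List.getD_eq_getElem?_getD, List.getElem?_append_right (le_refl _)]
    simp

-- mc's step function is the generic ominStep over shifted subproblem values
lemma mc_succ (k : Int) (reqs : List (List Int)) (maxc : Int) (t : Nat) (m : Int) :
    mc k reqs maxc (t + 1) m
      = (PySem.List.pyRange 1 (min m maxc + 1) 1).foldl
          (fun b c => ominStep b ((mc k reqs maxc t (m - c)).map (· + cst k reqs (t + 1) c))) none := by
  rw [mc]
  refine PySem.List.foldl_congr_mem _ _ _ _ (fun b c _ => ?_)
  cases h : mc k reqs maxc t (m - c) <;> simp [ominStep]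

-- ==== the DP model mc: it computes the minimum over valid compositions ====

lemma mc_le (k : Int) (reqs : List (List Int)) (maxc : Int) :
    ∀ (t : Nat) (m : Int) (cs : List Int), validComp k maxc t m cs →
    ∃ v, mc k reqs maxc t m = some v ∧ v ≤ costSum k reqs cs := by
  intro t
  induction t with
  | zero =>
    intro m cs hv
    obtain ⟨hlen, _, hsum⟩ := hv
    have : cs = [] := List.eq_nil_of_length_eq_zero hlen
    subst this
    simp at hsum
    refine ⟨0, by rw [← hsum]; rfl, by simp [costSum]⟩
  | succ t ih =>
    intro m cs hv
    obtain ⟨hlen, hbd, hsum⟩ := hv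
    rcases cs.eq_nil_or_concat with rfl | ⟨cs', c, rfl⟩
    · simp at hlen
    · have hlen' : cs'.length = t := by simp at hlen; omega
      have hbd' : ∀ x ∈ cs', 1 ≤ x ∧ x ≤ maxc := fun x hx => hbd x (by simp [hx])
      have hc : 1 ≤ c ∧ c ≤ maxc := hbd c (by simp)
      have hsum' : cs'.sum = m - c := by simp at hsum; omega
      have hnn : (0 : Int) ≤ cs'.sum :=
        List.sum_nonneg (fun y hy => by have := (hbd' y hy).1; omega)
      obtain ⟨v', hv1, hv2⟩ := ih (m - c) cs' ⟨hlen', hbd', hsum'⟩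
      have hmem : c ∈ PySem.List.pyRange 1 (min m maxc + 1) 1 :=
        PySem.List.mem_pyRange_one.mpr ⟨hc.1, by omega⟩
      rw [mc_succ]
      obtain ⟨v, hvv1, hvv2⟩ := ominFold_le
        (fun c => (mc k reqs maxc t (m - c)).map (· + cst k reqs (t + 1) c)) _ none c
        (v' + cst k reqs (t + 1) c) hmem (by simp only []; rw [hv1]; rfl)
      refine ⟨v, hvv1, ?_⟩
      rw [List.concat_eq_append, costSum_concat, hlen']
      omega

lemma mc_mem (k : Int) (reqs : List (List Int)) (maxc : Int) :
    ∀ (t : Nat) (m : Int) (v : Int), mc k reqs maxc t m = some v →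
    ∃ cs, validComp k maxc t m cs ∧ costSum k reqs cs = v := by
  intro t
  induction t with
  | zero =>
    intro m v h
    rw [mc] at h
    split at h
    · simp at h
      refine ⟨[], ⟨rfl, by simp, by simp; omega⟩, by simp [costSum, ← h]⟩
    · simp at h
  | succ t ih =>
    intro m v h
    rw [mc_succ] at h
    rcases ominFold_mem _ _ none v h with h1 | ⟨c, hc, hgc⟩
    · simp at h1
    · obtain ⟨hc1, hc2⟩ := PySem.List.mem_pyRange_one.mp hc
      cases hp : mc k reqs maxc t (m - c) with
      | none => rw [hp] at hgc; simp at hgc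
      | some p =>
        rw [hp] at hgc
        simp only [Option.map_some, Option.some_inj] at hgc
        obtain ⟨cs', ⟨hlen', hbd', hsum'⟩, hcost'⟩ := ih (m - c) p hp
        refine ⟨cs' ++ [c], ⟨by simp [hlen'], ?_, by simp [hsum']⟩, ?_⟩
        · intro x hx
          rcases List.mem_append.mp hx with hx | hx
          · exact hbd' x hx
          · simp at hx
            subst hx
            exact ⟨hc1, by omega⟩
        · rw [costSum_concat, hlen', hcost', hgc]

-- ==== A's outer loop computes the min over its combinations of the composition cost ====

lemma outerFold (k n : Int) (reqs : List (List Int)) (hk : 1 ≤ k) (hkn : k ≤ n)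
    (hreqs : ∀ r ∈ reqs, ReqOk k r) :
    ∀ (combos : List (List Int)),
      (∀ comb ∈ combos, comb ∈ PySem.List.combinations (PySem.List.pyRange 1 n 1) (k - 1).toNat) →
      ∀ (ans : Int) (m0 : List (List Int)), m0.length = (k + 1).toNat →
      (combos.foldl (aCombStep k n reqs) (ans, m0)).1
        = combos.foldl (fun a comb => min a (costSum k reqs (partsOf n comb))) ans := by
  intro combos
  induction combos with
  | nil => intro _ ans m0 _; rfl
  | cons comb rest ih =>
    intro hmem ans m0 hm0
    have hcomb := hmem comb (List.mem_cons_self ..)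
    obtain ⟨hsub, hclen⟩ := (PySem.List.mem_combinations_iff _ _ _).mp hcomb
    -- the freshly built mentors list
    have hbuilt : ∃ mentors : List (List Int),
        (aCombStep k n reqs (ans, m0) comb
          = (min ans (reqs.foldl aReqStep (0, mentors)).1, (reqs.foldl aReqStep (0, mentors)).2)) ∧
        mentors.length = (k + 1).toNat ∧
        (∀ j : Nat, 1 ≤ j → j ≤ k.toNat →
          mentors.getD j [] = List.replicate ((partsOf n comb).getD (j - 1) 0).toNat (0 : Int)) := by
      by_cases hk1 : 1 < k
      · refine ⟨_, ?_, buildMentors k n hk1 comb hclen m0 hm0⟩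
        unfold aCombStep
        rw [if_pos hk1]
      · have hk1' : k = 1 := by omega
        refine ⟨PySem.List.pySetD m0 1 (List.replicate n.toNat (0 : Int)), ?_, ?_, ?_⟩
        · unfold aCombStep
          rw [if_neg hk1, if_pos (by omega : k ≠ 0)]
        · simp [PySem.List.length_pySetD, hm0]
        · intro j hja hjb
          have hj : j = 1 := by
            rw [hk1'] at hjb
            simp at hjb
            omega
          subst hj
          have hcomb0 : comb = [] := by
            have : comb.length = 0 := by rw [hclen, hk1']; rfl
            exact List.eq_nil_of_length_eq_zero this
          subst hcomb0
          rw [show (1 : Int) = ((1 : Nat) : Int) from rfl, PySem.List.pySetD_natCast,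
              getD_set_list m0 1 1 _ [] (by rw [hm0]; omega), if_pos rfl]
          simp [partsOf]
    obtain ⟨mentors, hstep, hmlen, hmget⟩ := hbuilt
    have hval : (reqs.foldl aReqStep (0, mentors)).1 = costSum k reqs (partsOf n comb) := by
      rw [decompA k hk reqs hreqs mentors 0 hmlen]
      unfold costSum
      have hplen : (partsOf n comb).length = k.toNat := by
        rw [length_partsOf, hclen]
        omega
      rw [hplen]
      rw [zero_add]
      refine Finset.sum_congr rfl (fun j hj => ?_)
      rw [hmget (j + 1) (by omega) (by have := Finset.mem_range.mp hj; omega)]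
      rw [show j + 1 - 1 = j by omega]
      rfl
    have hlen2 : (reqs.foldl aReqStep (0, mentors)).2.length = (k + 1).toNat := by
      rw [lengthA reqs mentors 0, hmlen]
    rw [List.foldl_cons, hstep,
        ih (fun c hc => hmem c (List.mem_cons_of_mem _ hc)) _ _ hlen2,
        List.foldl_cons, hval]

lemma foldl_min_eq (l : List Int) (v : Int) (hmem : v ∈ l) (hle : ∀ x ∈ l, v ≤ x) :
    ∀ a : Int, l.foldl min a = min a v := by
  induction l with
  | nil => intro a; simp at hmem
  | cons x xs ih =>
    intro a
    simp only [List.foldl_cons]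
    rcases List.mem_cons.mp hmem with rfl | hmem'
    · -- v is the head; every later element is ≥ v
      have hxs : ∀ y ∈ xs, v ≤ y := fun y hy => hle y (by simp [hy])
      clear ih hmem hle
      induction xs generalizing a with
      | nil => simp
      | cons z zs ihz =>
        simp only [List.foldl_cons]
        have hz : v ≤ z := hxs z (by simp)
        rw [show min (min a v) z = min (min a z) v by omega,
            show min a v = min (min a z) v by omega]
        exact ihz (min a z) (fun y hy => hxs y (by simp [hy]))
    · have hxv : v ≤ x := hle x (by simp)
      rw [ih hmem' (fun y hy => hle y (by simp [hy])) (min a x)]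
      omega

-- ==== B's table equals mc ====

lemma groupsEq (k : Int) (hk : 1 ≤ k) (reqs : List (List Int)) (hreqs : ∀ r ∈ reqs, ReqOk k r) :
    ∀ (g0 : List (List (Int × Int))), g0.length = (k + 1).toNat →
      (reqs.foldl groupStep g0).length = g0.length ∧
      ∀ j : Nat, 1 ≤ j → j ≤ k.toNat →
        (reqs.foldl groupStep g0).getD j [] = g0.getD j [] ++ jobsOf k j reqs := by
  induction reqs with
  | nil => intro g0 _; exact ⟨rfl, fun j _ _ => by simp [jobsOf]⟩
  | cons r rs ih =>
    intro g0 hg0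
    obtain ⟨hlen3, htyp⟩ := hreqs r (List.mem_cons_self ..)
    obtain ⟨a, b, t, rfl⟩ : ∃ a b t, r = [a, b, t] := by
      match r, hlen3 with
      | [a, b, t], _ => exact ⟨a, b, t, rfl⟩
    simp only [List.getD] at htyp
    simp only [List.getElem?_cons_succ, List.getElem?_cons_zero, Option.getD_some] at htyp
    set j0 := effIdx k t with hj0def
    obtain ⟨hj1, hj2⟩ := effIdx_bounds k t hk htyp
    have hstep : groupStep g0 [a, b, t] = g0.set j0 (g0.getD j0 [] ++ [(a, b)]) := by
      unfold groupStep
      simp only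
      rw [pySetD_wrap g0 k t _ hk hg0 htyp, pyGet?_wrap g0 k t hk hg0 htyp,
          List.getD_eq_getElem?_getD]
    have hg1 : (g0.set j0 (g0.getD j0 [] ++ [(a, b)])).length = (k + 1).toNat := by
      simp [hg0]
    obtain ⟨ihl, ihg⟩ := ih (fun r hr => hreqs r (List.mem_cons_of_mem _ hr)) _ hg1
    refine ⟨by rw [List.foldl_cons, hstep, ihl]; simp [hg0], fun j hja hjb => ?_⟩
    rw [List.foldl_cons, hstep, ihg j hja hjb,
        getD_set_list g0 j0 j _ [] (by omega)]
    have hjobs : jobsOf k j ([a, b, t] :: rs)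
        = if j0 = j then (a, b) :: jobsOf k j rs else jobsOf k j rs := by
      unfold jobsOf
      by_cases hcase : j0 = j
      · rw [if_pos hcase]
        rw [List.filter_cons_of_pos (by simp [List.getD]; omega)]
        simp [List.getD]
      · rw [if_neg hcase]
        rw [List.filter_cons_of_neg (by simp [List.getD]; omega)]
    rw [hjobs]
    by_cases hcase : j0 = j
    · rw [if_pos hcase, if_pos hcase]
      simp [hcase]
    · rw [if_neg hcase, if_neg hcase]

-- ==== B's cost table and DP list ====

lemma consMapRangeLookup {α : Type} (x0 : α) (f : Int → α) (B c : Int) (d : α)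
    (h1 : 1 ≤ c) (h2 : c < B + 1) :
    (PySem.List.pyGet? (x0 :: (PySem.List.pyRange 1 (B + 1) 1).map f) c).getD d = f c := by
  rw [PySem.List.pyGet?_of_nonneg _ (by omega : (0 : Int) ≤ c)]
  rw [show c.toNat = (c.toNat - 1) + 1 by omega, List.getElem?_cons_succ, List.getElem?_map,
      PySem.List.getElem?_pyRange_one, if_pos (by omega : c.toNat - 1 < (B + 1 - 1).toNat)]
  simp only [Option.map_some, Option.getD_some]
  congr 1
  omega

-- mc at m = 0 with at least one type left is infeasible
lemma mc_zero (k : Int) (reqs : List (List Int)) (maxc : Int) (hmaxc : 1 ≤ maxc) (t : Nat) :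
    mc k reqs maxc (t + 1) 0 = none := by
  rw [mc]
  rw [show min (0 : Int) maxc = 0 by omega, PySem.List.pyRange_one_eq_nil (by omega)]
  rfl

lemma aGetD_toArray {α : Type} (l : List α) (i : Int) (d : α) (h : 0 ≤ i) :
    aGetD l.toArray i d = (PySem.List.pyGet? l i).getD d := by
  unfold aGetD
  rw [if_pos h, PySem.List.pyGet?_of_nonneg _ h]
  rcases lt_or_ge i.toNat l.length with hlt | hge
  · rw [Array.getD, dif_pos (by simpa using hlt), List.getElem?_eq_getElem hlt]
    exact List.getElem_toArray _
  · rw [Array.getD, dif_neg (by simpa using not_lt.mpr hge), List.getElem?_eq_none hge]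
    rfl

lemma pyGet?_map' {α β : Type} (f : α → β) (l : List α) (i : Int) :
    PySem.List.pyGet? (l.map f) i = (PySem.List.pyGet? l i).map f := by
  unfold PySem.List.pyGet?
  rw [List.length_map]
  cases PySem.List.pyIdx? l.length i <;> simp


lemma dpCell_eq_mc (k n : Int) (reqs : List (List Int)) (cost : Array (Array Int)) (maxc : Int)
    (hcost : ∀ t c : Int, 1 ≤ t → t ≤ k → 1 ≤ c → c ≤ maxc →
      aGetD (aGetD cost t #[]) c 0 = cst k reqs t.toNat c)
    (T : Nat) (hTk : (T : Int) + 1 ≤ k) (best : Array (Option Int))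
    (hbest : ∀ m' : Int, 0 ≤ m' → m' ≤ n →
      aGetD best m' none = mc k reqs maxc T m')
    (m : Int) (hm : 1 ≤ m) (hmn : m ≤ n) :
    dpCell cost maxc best ((T : Int) + 1) m = mc k reqs maxc (T + 1) m := by
  rw [mc_succ]
  unfold dpCell
  refine PySem.List.foldl_congr_mem _ _ _ _ (fun b c hc => ?_)
  obtain ⟨hc1, hc2⟩ := PySem.List.mem_pyRange_one.mp hc
  rw [hbest (m - c) (by omega) (by omega)]
  rw [hcost ((T : Int) + 1) c (by omega) hTk (by omega) (by omega)]
  rw [show ((T : Int) + 1).toNat = T + 1 by omega]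
  cases mc k reqs maxc T (m - c) <;> rfl

lemma dpFold (k n : Int) (reqs : List (List Int)) (cost : Array (Array Int)) (maxc : Int)
    (hmaxc : maxc = n - (k - 1)) (hk : 1 ≤ k) (hkn : k ≤ n)
    (hcost : ∀ t c : Int, 1 ≤ t → t ≤ k → 1 ≤ c → c ≤ maxc →
      aGetD (aGetD cost t #[]) c 0 = cst k reqs t.toNat c) :
    ∀ T : Nat, (T : Int) ≤ k →
    ∀ m : Int, 0 ≤ m → m ≤ n →
    aGetD ((PySem.List.pyRange 1 ((T : Int) + 1) 1).foldl
        (fun best t => ((none : Option Int) :: (PySem.List.pyRange 1 (n + 1) 1).map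
          (fun m => dpCell cost maxc best t m)).toArray)
        ((some (0 : Int)) :: List.replicate n.toNat (none : Option Int)).toArray) m none
      = mc k reqs maxc T m := by
  have hmaxc1 : 1 ≤ maxc := by omega
  intro T
  induction T with
  | zero =>
    intro _ m hm0 hmn
    rw [show ((0 : Nat) : Int) + 1 = 1 by norm_num,
        PySem.List.pyRange_one_eq_nil (le_refl (1 : Int)),
        List.foldl_nil, aGetD_toArray _ _ _ hm0, PySem.List.pyGet?_of_nonneg _ hm0]
    rcases eq_or_lt_of_le hm0 with h0 | h0
    · rw [show m.toNat = 0 by omega]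
      simp [mc, ← h0]
    · rw [show m.toNat = (m.toNat - 1) + 1 by omega, List.getElem?_cons_succ,
          List.getElem?_replicate, if_pos (by omega : m.toNat - 1 < n.toNat)]
      rw [mc, if_neg (by omega : ¬ m = 0)]
      rfl
  | succ T ih =>
    intro hTk m hm0 hmn
    rw [show ((T + 1 : Nat) : Int) + 1 = ((T : Int) + 1) + 1 by push_cast; ring,
        PySem.List.pyRange_one_succ_right (a := 1) (b := (T : Int) + 1) (by omega),
        List.foldl_append, List.foldl_cons, List.foldl_nil]
    rw [aGetD_toArray _ _ _ hm0]
    rcases eq_or_lt_of_le hm0 with h0 | h0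
    · rw [← h0]
      rw [show PySem.List.pyGet? (none :: _) (0 : Int) = some none from
            PySem.List.pyGet?_zero_cons _ _]
      rw [mc_zero k reqs maxc hmaxc1 T]
      rfl
    · rw [PySem.List.pyGet?_of_nonneg _ hm0,
          show m.toNat = (m.toNat - 1) + 1 by omega, List.getElem?_cons_succ,
          List.getElem?_map, PySem.List.getElem?_pyRange_one,
          if_pos (by omega : m.toNat - 1 < (n + 1 - 1).toNat)]
      simp only [Option.map_some, Option.getD_some]
      rw [show (1 : Int) + (↑(m.toNat - 1) : Int) = m by omega]
      exact dpCell_eq_mc k n reqs cost maxc hcost T (by omega) _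
        (fun m' h1 h2 => ih (by omega) m' h1 h2) m (by omega) hmn

theorem solution_spec : Claim_equal_solution := by
  intro k n reqs _ hpre
  obtain ⟨hk, hk1n, hrows⟩ := hpre
  unfold Spec_solution
  by_cases hkn : k ≤ n
  · -- main case: a distribution exists
    have hreqs : ∀ r ∈ reqs, ReqOk k r := fun r hr => hrows hkn r hr
    have hn1 : 1 ≤ n := by omega
    -- B's request groups
    have hg0 : (List.replicate (k + 1).toNat ([] : List (Int × Int))).length = (k + 1).toNat := by
      simp
    obtain ⟨hglen, hgget⟩ := groupsEq k hk reqs hreqs _ hg0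
    have hgget' : ∀ j : Nat, 1 ≤ j → j ≤ k.toNat →
        (reqs.foldl groupStep (List.replicate (k + 1).toNat [])).getD j [] = jobsOf k j reqs := by
      intro j h1 h2
      rw [hgget j h1 h2]
      have : (List.replicate (k + 1).toNat ([] : List (Int × Int))).getD j [] = [] := by
        rw [List.getD_eq_getElem?_getD, List.getElem?_replicate]
        split <;> rfl
      rw [this, List.nil_append]
    -- B's cost table satisfies the lookup property
    set maxc : Int := n - (k - 1) with hmaxc
    set groups := reqs.foldl groupStep (List.replicate (k + 1).toNat ([] : List (Int × Int)))
      with hgroups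
    set costA : Array (Array Int) :=
      ((List.replicate (maxc + 1).toNat (0 : Int)).toArray ::
        (PySem.List.pyRange 1 (k + 1) 1).map (fun t =>
          ((0 : Int) :: (PySem.List.pyRange 1 (maxc + 1) 1).map (fun c =>
            waitAlt ((PySem.List.pyGet? groups t).getD []) c.toNat)).toArray)).toArray
      with hcostA
    have hcost : ∀ t c : Int, 1 ≤ t → t ≤ k → 1 ≤ c → c ≤ maxc →
        aGetD (aGetD costA t #[]) c 0 = cst k reqs t.toNat c := by
      intro t c ht1 ht2 hc1 hc2
      have hArrEq : costA = ((((List.replicate (maxc + 1).toNat (0 : Int))) ::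
          (PySem.List.pyRange 1 (k + 1) 1).map (fun t =>
            (0 : Int) :: (PySem.List.pyRange 1 (maxc + 1) 1).map (fun c =>
              waitAlt ((PySem.List.pyGet? groups t).getD []) c.toNat))).map
            (fun r => r.toArray)).toArray := by
        rw [hcostA]
        simp [List.map_map]
      rw [hArrEq, aGetD_toArray _ _ _ (by omega : (0 : Int) ≤ t), pyGet?_map']
      have hrow : ((PySem.List.pyGet? ((List.replicate (maxc + 1).toNat (0 : Int)) ::
          (PySem.List.pyRange 1 (k + 1) 1).map (fun t =>
            (0 : Int) :: (PySem.List.pyRange 1 (maxc + 1) 1).map (fun c =>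
              waitAlt ((PySem.List.pyGet? groups t).getD []) c.toNat))) t).getD [])
          = (0 : Int) :: (PySem.List.pyRange 1 (maxc + 1) 1).map (fun c =>
              waitAlt ((PySem.List.pyGet? groups t).getD []) c.toNat) := by
        exact consMapRangeLookup _ _ k t [] ht1 (by omega)
      have hmap : (Option.map (fun r : List Int => r.toArray)
            (PySem.List.pyGet? ((List.replicate (maxc + 1).toNat (0 : Int)) ::
              (PySem.List.pyRange 1 (k + 1) 1).map (fun t =>
                (0 : Int) :: (PySem.List.pyRange 1 (maxc + 1) 1).map (fun c =>
                  waitAlt ((PySem.List.pyGet? groups t).getD []) c.toNat))) t)).getD #[]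
          = ((0 : Int) :: (PySem.List.pyRange 1 (maxc + 1) 1).map (fun c =>
              waitAlt ((PySem.List.pyGet? groups t).getD []) c.toNat)).toArray := by
        cases hpg : PySem.List.pyGet? ((List.replicate (maxc + 1).toNat (0 : Int)) ::
              (PySem.List.pyRange 1 (k + 1) 1).map (fun t =>
                (0 : Int) :: (PySem.List.pyRange 1 (maxc + 1) 1).map (fun c =>
                  waitAlt ((PySem.List.pyGet? groups t).getD []) c.toNat))) t with
        | none => rw [hpg] at hrow; simp at hrow
        | some row =>
          rw [hpg] at hrow
          simp at hrow ⊢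
          rw [hrow]
      rw [hmap, aGetD_toArray _ _ _ (by omega : (0 : Int) ≤ c),
          consMapRangeLookup _ _ maxc c 0 hc1 (by omega)]
      have hgt : (PySem.List.pyGet? groups t).getD [] = jobsOf k t.toNat reqs := by
        rw [PySem.List.pyGet?_of_nonneg _ (by omega : (0 : Int) ≤ t), hgroups,
            ← hgget' t.toNat (by omega) (by omega), List.getD_eq_getElem?_getD]
      rw [hgt]
      rfl
    -- the DP value: mc at (k, n)
    have hvalid0 : validComp k maxc k.toNat n (List.replicate (k.toNat - 1) 1 ++ [maxc]) := by
      refine ⟨by simp; omega, ?_, ?_⟩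
      · intro c hc
        rcases List.mem_append.mp hc with hc | hc
        · have := List.eq_of_mem_replicate hc
          omega
        · simp at hc
          omega
      · rw [List.sum_append, List.sum_replicate, List.sum_singleton]
        simp
        omega
    obtain ⟨v, hv, _⟩ := mc_le k reqs maxc k.toNat n _ hvalid0
    -- B returns min INF v
    have hkc : ((k.toNat : Int)) = k := by omega
    have hdp := dpFold k n reqs costA maxc hmaxc hk hkn hcost k.toNat (by omega) n (by omega)
      (le_refl n)
    rw [hkc, hv] at hdp
    have hB : solution_alt k n reqs = min 1000000000 v := by
      simp only [solution_alt]
      rw [if_neg (by omega : ¬ k > n)]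
      rw [← hmaxc, ← hgroups, ← hcostA, hdp]
    -- A returns min INF v as well
    have hA : solution k n reqs = min 1000000000 v := by
      unfold solution
      rw [if_pos (by rw [PySem.List.length_pyRange_one]; omega :
            (k - 1).toNat ≤ (PySem.List.pyRange 1 n 1).length)]
      rw [outerFold k n reqs hk hkn hreqs _ (fun c hc => hc) 1000000000 _ (by simp),
          ← List.foldl_map]
      refine foldl_min_eq _ v ?_ ?_ 1000000000
      · obtain ⟨cs, hvalid, hcs⟩ := mc_mem k reqs maxc k.toNat n v hv
        obtain ⟨comb, hcm, hparts⟩ := comp_realized k n hk cs hvalid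
        exact List.mem_map.mpr ⟨comb, hcm, by rw [hparts, hcs]⟩
      · intro x hx
        obtain ⟨comb, hcm, rfl⟩ := List.mem_map.mp hx
        obtain ⟨v2, hv2, hle2⟩ := mc_le k reqs maxc k.toNat n _ (partsOf_valid k n hk hkn comb hcm)
        have : v2 = v := by
          rw [hv] at hv2
          exact (Option.some_inj.mp hv2).symm
        omega
    rw [hA, hB]
  · -- k > n: no distribution; both sides return 10^9
    have hk2 : 2 ≤ k := by
      by_cases hone : k = 1
      · exact absurd (by omega : k ≤ n) hkn
      · omega
    have hA : solution k n reqs = 1000000000 := by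
      unfold solution
      rw [if_neg (by rw [PySem.List.length_pyRange_one]; omega :
            ¬ (k - 1).toNat ≤ (PySem.List.pyRange 1 n 1).length)]
      rfl
    have hB : solution_alt k n reqs = 1000000000 := by
      simp only [solution_alt]
      rw [if_pos (by omega : k > n)]
    rw [hA, hB]
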